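-- pv_equiv track=rewrite | github.com/LucksLab/spats | spats_shape_seq/util.py | string_find_with_overlap
-- ===== SOURCE A (Python) =====
-- def string_find_with_overlap(needle, haystack):
--     hlen = len(haystack)
--     nlen = len(needle)
--     if hlen >= nlen:
--         h = haystack.find(needle)
--         if -1 != h:
--             return h
--     h = min(hlen - nlen + 1, 0)
--     n = hlen - h
--     while h < hlen and n >= 0:
--         if needle[:n] == haystack[h:]:
--             return h
--         h += 1
--         n -= 1
--     return -1
-- ===== SOURCE B (Python) =====
-- def string_find_with_overlap(needle, haystack):
--     # KMP: one linear pass; final automaton state = longest needle-prefix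
--     # that is a suffix of haystack, which is exactly the overhang A scans for.
--     nlen = len(needle)
--     if nlen == 0:
--         return 0
--     fail = [0] * nlen
--     k = 0
--     for i in range(1, nlen):
--         while k > 0 and needle[i] != needle[k]:
--             k = fail[k - 1]
--         if needle[i] == needle[k]:
--             k += 1
--         fail[i] = k
--     j = 0
--     for i in range(len(haystack)):
--         while j > 0 and haystack[i] != needle[j]:
--             j = fail[j - 1]
--         if haystack[i] == needle[j]:
--             j += 1
--         if j == nlen:
--             return i + 1 - nlen
--     return len(haystack) - j if j > 0 else -1
-- ===== Notes on version B (the rewrite author's own statement) =====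
-- stated objective: faster
-- what changed: B replaces A's library find plus per-position overhang scan (one slice comparison per candidate position) by a single KMP pass: it builds the needle's failure table, streams the haystack once, returns the first full-match start, and otherwise derives the overhang from the final automaton state (the longest needle-prefix that is a suffix of the haystack).
import Mathlib
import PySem

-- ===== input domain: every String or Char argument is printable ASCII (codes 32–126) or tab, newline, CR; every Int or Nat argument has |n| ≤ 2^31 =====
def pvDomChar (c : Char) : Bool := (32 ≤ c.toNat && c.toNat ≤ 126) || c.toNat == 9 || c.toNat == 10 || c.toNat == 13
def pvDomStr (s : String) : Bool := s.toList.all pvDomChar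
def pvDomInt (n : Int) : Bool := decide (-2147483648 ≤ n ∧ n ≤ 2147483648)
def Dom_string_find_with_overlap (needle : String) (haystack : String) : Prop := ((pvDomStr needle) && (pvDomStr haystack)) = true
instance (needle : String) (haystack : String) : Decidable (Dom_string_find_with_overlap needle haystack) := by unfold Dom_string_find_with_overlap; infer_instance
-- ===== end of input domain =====

-- B replaces A's library find plus overhang scan (one slice comparison per position)
-- by a single KMP pass: failure table + automaton state, whose final value is the
-- longest needle-prefix that is a suffix of the haystack (objective: faster).

-- ===== PORT A =====
-- A's while loop: h ascending, n = hlen - h descending; checks needle[:n] == haystack[h:]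
def sfwLoopA (nl hl : List Char) (hlen h n : Int) : Int :=
  if c : h < hlen ∧ 0 ≤ n then
    if PySem.List.slice nl none (some n) = PySem.List.slice hl (some h) none then h
    else sfwLoopA nl hl hlen (h + 1) (n - 1)
  else -1
termination_by (hlen - h).toNat
decreasing_by omega

def string_find_with_overlap (needle : String) (haystack : String) : Int :=
  let hl := haystack.toList
  let nl := needle.toList
  let hlen : Int := hl.length
  let nlen : Int := nl.length
  let phase2 :=
    let h0 := min (hlen - nlen + 1) 0
    sfwLoopA nl hl hlen h0 (hlen - h0)
  if hlen ≥ nlen then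
    let h := PySem.Chars.find hl nl
    if -1 ≠ h then h else phase2
  else phase2

-- ===== PORT B =====
-- Source B's inner `while k > 0 and c != needle[k]: k = fail[k-1]`.
-- `fuel` only makes the recursion total; called with fuel = k it is exact, because
-- the table built below satisfies fail[t] ≤ t, so k strictly decreases.
def kmpWhile (nl : List Char) (fail : List Nat) (c : Char) (k : Nat) (fuel : Nat) : Nat :=
  match fuel with
  | 0 => k
  | fuel + 1 =>
      if k > 0 && !(c == nl.getD k ' ') then
        kmpWhile nl fail c (fail.getD (k - 1) 0) fuel
      else k

-- Source B's failure-table loop `for i in range(1, nlen)` after m iterations; the grown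
-- list holds fail[0..m] (Python preallocates [0]*nlen but only ever reads the
-- already-filled prefix, so the growing list is the same table), .2 is k.
def kmpFailAux (nl : List Char) : Nat → List Nat × Nat
  | 0 => ([0], 0)
  | m + 1 =>
      let p := kmpFailAux nl m
      let k1 := kmpWhile nl p.1 (nl.getD (m + 1) ' ') p.2 p.2
      let k2 := if nl.getD (m + 1) ' ' == nl.getD k1 ' ' then k1 + 1 else k1
      (p.1 ++ [k2], k2)

-- Source B's scan `for i in range(len(haystack))` with state j; rest = haystack[i:]
def kmpScan (nl : List Char) (fail : List Nat) (rest : List Char) (i j : Nat) : Int :=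
  match rest with
  | [] => if j > 0 then (i : Int) - (j : Int) else -1
  | c :: cs =>
      let j1 := kmpWhile nl fail c j j
      let j2 := if c == nl.getD j1 ' ' then j1 + 1 else j1
      if j2 = nl.length then (i : Int) + 1 - (nl.length : Int)
      else kmpScan nl fail cs (i + 1) j2

def string_find_with_overlap_alt (needle : String) (haystack : String) : Int :=
  let nl := needle.toList
  if nl.length = 0 then 0
  else
    let fail := (kmpFailAux nl (nl.length - 1)).1
    kmpScan nl fail haystack.toList 0 0

-- ===== PRECONDITION & SPEC =====
def Spec_string_find_with_overlap (needle : String) (haystack : String) (out : Int) : Prop := out = string_find_with_overlap_alt needle haystack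
instance (needle : String) (haystack : String) (out : Int) : Decidable (Spec_string_find_with_overlap needle haystack out) := by unfold Spec_string_find_with_overlap; infer_instance

-- ===== CLAIM (what is proved, stated in full; the proofs are below) =====
def Claim_equal_string_find_with_overlap : Prop := ∀ (needle : String) (haystack : String), Dom_string_find_with_overlap needle haystack → Spec_string_find_with_overlap needle haystack (string_find_with_overlap needle haystack)

-- ===== LEMMAS AND PROOFS =====

-- mpF nl x b = largest m ≤ b with needle-prefix nl.take m a suffix of x
def mpF (nl x : List Char) (b : Nat) : Nat :=
  Nat.findGreatest (fun m => nl.take m <:+ x) b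

-- piF nl t = KMP failure value: largest m ≤ t with nl.take m a suffix of nl.take (t+1)
def piF (nl : List Char) (t : Nat) : Nat :=
  Nat.findGreatest (fun m => nl.take m <:+ nl.take (t + 1)) t

-- descending-overlap helper (proof-side only): what A's phase 2 computes
def ovDescend (nl hl : List Char) (k : Nat) : Int :=
  match k with
  | 0 => -1
  | Nat.succ k' =>
    if PySem.Chars.endswith hl (PySem.List.slice nl none (some ((k' : Int) + 1))) then
      (hl.length : Int) - ((k' : Int) + 1)
    else ovDescend nl hl k'

-- common characterisation both programs are reduced to
def sfwSpec (nl hl : List Char) : Int :=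
  if nl = [] then 0
  else if PySem.Chars.find hl nl ≠ -1 then PySem.Chars.find hl nl
  else if 0 < mpF nl hl nl.length then (hl.length : Int) - (mpF nl hl nl.length : Int)
  else -1

-- ---------- generic list lemmas ----------

lemma suffix_of_suffix_of_le {α : Type} (l1 l2 x : List α)
    (h1 : l1 <:+ x) (h2 : l2 <:+ x) (h : l1.length ≤ l2.length) : l1 <:+ l2 := by
  have hx1 : l1.length ≤ x.length := h1.length_le
  have hx2 : l2.length ≤ x.length := h2.length_le
  have e1 := List.suffix_iff_eq_drop.mp h1
  have e2 := List.suffix_iff_eq_drop.mp h2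
  have e3 : l1 = l2.drop (l2.length - l1.length) := by
    conv_lhs => rw [e1]
    conv_lhs => rw [show x.length - l1.length
      = (x.length - l2.length) + (l2.length - l1.length) from by omega]
    rw [← List.drop_drop, ← e2]
  rw [e3]
  exact List.drop_suffix _ _

lemma take_succ_getD (l : List Char) (m : Nat) (h : m < l.length) :
    l.take (m + 1) = l.take m ++ [l.getD m ' '] := by
  rw [List.take_succ]
  congr 1
  simp [List.getElem?_eq_getElem h, List.getD]

lemma concat_suffix_concat (a x : List Char) (b c : Char) :
    a ++ [b] <:+ x ++ [c] ↔ b = c ∧ a <:+ x := by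
  constructor
  · rintro ⟨t, ht⟩
    have h2 : (t ++ a) ++ [b] = x ++ [c] := by rw [← ht]; simp
    obtain ⟨h3, h4⟩ := List.append_inj' h2 (by simp)
    exact ⟨by simpa using h4, ⟨t, h3⟩⟩
  · rintro ⟨rfl, ⟨t, rfl⟩⟩
    exact ⟨t, by simp⟩

lemma take_suffix_concat (nl x : List Char) (c : Char) (m : Nat)
    (h1 : 1 ≤ m) (hm : m ≤ nl.length) :
    nl.take m <:+ x ++ [c] ↔ (nl.take (m - 1) <:+ x ∧ nl.getD (m - 1) ' ' = c) := by
  obtain ⟨m', rfl⟩ : ∃ m', m = m' + 1 := ⟨m - 1, by omega⟩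
  rw [take_succ_getD nl m' (by omega), concat_suffix_concat]
  simp only [Nat.add_sub_cancel]
  exact ⟨fun ⟨a, b⟩ => ⟨b, a⟩, fun ⟨a, b⟩ => ⟨b, a⟩⟩

lemma suffix_take_iff_prefix_drop (nl hl : List Char) (i1 : Nat) (hi : i1 ≤ hl.length) :
    nl <:+ hl.take i1 ↔ (nl.length ≤ i1 ∧ nl <+: hl.drop (i1 - nl.length)) := by
  have hd : (hl.take i1).length = i1 := by simp [List.length_take]; omega
  constructor
  · intro h
    have hlen : nl.length ≤ i1 := by have := h.length_le; omega
    refine ⟨hlen, ?_⟩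
    rw [List.prefix_iff_eq_take]
    have e := List.suffix_iff_eq_drop.mp h
    rw [hd] at e
    rw [List.drop_take] at e
    rw [show i1 - (i1 - nl.length) = nl.length from by omega] at e
    exact e
  · rintro ⟨hlen, hp⟩
    rw [List.suffix_iff_eq_drop, hd, List.drop_take,
      show i1 - (i1 - nl.length) = nl.length from by omega]
    exact List.prefix_iff_eq_take.mp hp

lemma findGreatest_eq_of_bound (P : Nat → Prop) [DecidablePred P] (b b' : Nat)
    (h : b' ≤ b) (hnp : ∀ m, b' < m → m ≤ b → ¬ P m) :
    Nat.findGreatest P b = Nat.findGreatest P b' := by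
  obtain ⟨d, rfl⟩ := Nat.exists_eq_add_of_le h
  clear h
  induction d with
  | zero => rfl
  | succ d ih =>
      rw [show b' + (d + 1) = (b' + d) + 1 from by omega, Nat.findGreatest_succ,
        if_neg (hnp _ (by omega) (by omega))]
      exact ih (fun m h1 h2 => hnp m h1 (by omega))

lemma getD_append_lt (l l2 : List Nat) (t : Nat) (h : t < l.length) :
    (l ++ l2).getD t 0 = l.getD t 0 := by
  simp [List.getD, List.getElem?_append_left h]

lemma getD_append_last (l : List Nat) (a : Nat) :
    (l ++ [a]).getD l.length 0 = a := by
  simp [List.getD]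

-- ---------- piF / mpF facts ----------

lemma piF_le (nl : List Char) (t : Nat) : piF nl t ≤ t := Nat.findGreatest_le t

lemma piF_suffix (nl : List Char) (t : Nat) : nl.take (piF nl t) <:+ nl.take (t + 1) := by
  unfold piF
  exact Nat.findGreatest_spec (P := fun m => nl.take m <:+ nl.take (t + 1))
    (Nat.zero_le _) (by simp)

lemma le_piF (nl : List Char) (t k : Nat) (hk : k ≤ t)
    (hs : nl.take k <:+ nl.take (t + 1)) : k ≤ piF nl t :=
  Nat.le_findGreatest hk hs

lemma mpF_suffix (nl x : List Char) (b : Nat) : nl.take (mpF nl x b) <:+ x := by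
  unfold mpF
  exact Nat.findGreatest_spec (P := fun m => nl.take m <:+ x) (Nat.zero_le _) (by simp)

lemma le_mpF (nl x : List Char) (b k : Nat) (hk : k ≤ b)
    (hs : nl.take k <:+ x) : k ≤ mpF nl x b :=
  Nat.le_findGreatest hk hs

-- ---------- the while loop ----------

lemma kmpWhile_fuel (nl : List Char) (fail : List Nat) (c : Char) :
    ∀ k f1 f2, (∀ t, t < k → fail.getD t 0 ≤ t) → k ≤ f1 → k ≤ f2 →
      kmpWhile nl fail c k f1 = kmpWhile nl fail c k f2 := by
  intro k
  induction k using Nat.strong_induction_on with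
  | _ k ih =>
    intro f1 f2 hp h1 h2
    match k, f1, f2 with
    | 0, 0, 0 => rfl
    | 0, 0, f2 + 1 => simp [kmpWhile]
    | 0, f1 + 1, 0 => simp [kmpWhile]
    | 0, f1 + 1, f2 + 1 => simp [kmpWhile]
    | k + 1, f1 + 1, f2 + 1 =>
      simp only [kmpWhile]
      by_cases hc : c = nl.getD (k + 1) ' '
      · rw [if_neg (by simpa using hc), if_neg (by simpa using hc)]
      · rw [if_pos (by simpa using hc), if_pos (by simpa using hc)]
        have hk' : fail.getD (k + 1 - 1) 0 ≤ k := by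
          have := hp k (by omega); simpa using this
        simp only [Nat.add_sub_cancel] at hk' ⊢
        exact (ih (fail.getD k 0) (by omega) f1 f2
          (fun t ht => hp t (by omega)) (by omega) (by omega))

-- the heart: one KMP step (while-descent + conditional increment) computes the
-- greatest clipped-needle-prefix that is a suffix of x ++ [c]
lemma kmp_step (nl : List Char) (fail : List Nat) (x : List Char) (c : Char) (B : Nat)
    (hB : B < nl.length)
    (hfail : ∀ t, t < B → fail.getD t 0 = piF nl t) :
    ∀ j, j ≤ B → nl.take j <:+ x →
      (∀ k', k' ≤ B → nl.take k' <:+ x → nl.getD k' ' ' = c → k' ≤ j) →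
      (if c == nl.getD (kmpWhile nl fail c j j) ' '
        then kmpWhile nl fail c j j + 1 else kmpWhile nl fail c j j)
        = Nat.findGreatest (fun m => nl.take m <:+ x ++ [c]) (B + 1) := by
  intro j
  induction j using Nat.strong_induction_on with
  | _ j ih =>
    intro hjB ha hb
    match j with
    | 0 =>
      have hw : kmpWhile nl fail c 0 0 = 0 := rfl
      rw [hw]
      symm
      rw [Nat.findGreatest_eq_iff]
      by_cases hc : c = nl.getD 0 ' '
      · rw [if_pos (by simpa using hc)]
        refine ⟨by omega, fun _ => ?_, fun n hn1 hn2 hP => ?_⟩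
        · rw [take_suffix_concat nl x c 1 (by omega) (by omega)]
          exact ⟨by simp, hc.symm⟩
        · rw [take_suffix_concat nl x c n (by omega) (by omega)] at hP
          have := hb (n - 1) (by omega) hP.1 hP.2
          omega
      · rw [if_neg (by simpa using hc)]
        refine ⟨by omega, fun h => absurd rfl h, fun n hn1 hn2 hP => ?_⟩
        rw [take_suffix_concat nl x c n (by omega) (by omega)] at hP
        have hle := hb (n - 1) (by omega) hP.1 hP.2
        have : n = 1 := by omega
        subst this
        simp only [Nat.sub_self] at hP
        exact hc hP.2.symm
    | j + 1 =>
      by_cases hc : c = nl.getD (j + 1) ' '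
      · have hw : kmpWhile nl fail c (j + 1) (j + 1) = j + 1 := by
          rw [kmpWhile, if_neg (by simpa using hc)]
        rw [hw, if_pos (by simpa using hc)]
        symm
        rw [Nat.findGreatest_eq_iff]
        refine ⟨by omega, fun _ => ?_, fun n hn1 hn2 hP => ?_⟩
        · rw [take_suffix_concat nl x c (j + 2) (by omega) (by omega)]
          exact ⟨by simpa using ha, hc.symm⟩
        · rw [take_suffix_concat nl x c n (by omega) (by omega)] at hP
          have := hb (n - 1) (by omega) hP.1 hP.2
          omega
      · have hk : fail.getD j 0 = piF nl j := hfail j (by omega)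
        have hk1 : fail.getD j 0 ≤ j := by rw [hk]; exact piF_le nl j
        have hw : kmpWhile nl fail c (j + 1) (j + 1)
            = kmpWhile nl fail c (fail.getD j 0) (fail.getD j 0) := by
          rw [kmpWhile, if_pos (by simpa using hc)]
          simp only [Nat.add_sub_cancel]
          exact kmpWhile_fuel nl fail c (fail.getD j 0) j (fail.getD j 0)
            (fun t ht => by rw [hfail t (by omega)]; exact piF_le nl t)
            (by omega) (le_refl _)
        rw [hw]
        apply ih (fail.getD j 0) (by omega) (by omega)
        · rw [hk]
          exact (piF_suffix nl j).trans ha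
        · intro k' hk'B hk's hk'c
          have hle := hb k' hk'B hk's hk'c
          have hne : k' ≠ j + 1 := by
            intro heq
            subst heq
            exact hc hk'c.symm
          have hsf : nl.take k' <:+ nl.take (j + 1) :=
            suffix_of_suffix_of_le _ _ x hk's ha
              (by simp [List.length_take]; omega)
          rw [hk]
          exact le_piF nl j k' (by omega) hsf

-- ---------- the failure table ----------

lemma kmpFailAux_spec (nl : List Char) :
    ∀ m, m + 1 ≤ nl.length →
      (kmpFailAux nl m).1.length = m + 1 ∧ (kmpFailAux nl m).2 = piF nl m ∧
      (∀ t, t ≤ m → (kmpFailAux nl m).1.getD t 0 = piF nl t) := by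
  intro m
  induction m with
  | zero =>
      intro _
      refine ⟨rfl, rfl, fun t ht => ?_⟩
      have : t = 0 := by omega
      subst this
      rfl
  | succ m ih =>
      intro hlen
      obtain ⟨hL, hK, hT⟩ := ih (by omega)
      have hstep := kmp_step nl (kmpFailAux nl m).1 (nl.take (m + 1)) (nl.getD (m + 1) ' ') m
        (by omega) (fun t ht => hT t (by omega)) ((kmpFailAux nl m).2)
        (by rw [hK]; exact piF_le nl m)
        (by rw [hK]; exact piF_suffix nl m)
        (by intro k' h1 h2 _; rw [hK]; exact le_piF nl m k' h1 h2)
      rw [← take_succ_getD nl (m + 1) (by omega)] at hstep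
      have hstep' : (if nl.getD (m + 1) ' '
            == nl.getD (kmpWhile nl (kmpFailAux nl m).1 (nl.getD (m + 1) ' ')
              (kmpFailAux nl m).2 (kmpFailAux nl m).2) ' '
          then kmpWhile nl (kmpFailAux nl m).1 (nl.getD (m + 1) ' ')
              (kmpFailAux nl m).2 (kmpFailAux nl m).2 + 1
          else kmpWhile nl (kmpFailAux nl m).1 (nl.getD (m + 1) ' ')
              (kmpFailAux nl m).2 (kmpFailAux nl m).2) = piF nl (m + 1) := hstep
      refine ⟨?_, ?_, ?_⟩
      · simp only [kmpFailAux]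
        simp [hL]
      · simp only [kmpFailAux]
        exact hstep'
      · intro t ht
        simp only [kmpFailAux]
        by_cases htm : t ≤ m
        · rw [getD_append_lt _ _ t (by omega)]
          exact hT t htm
        · have hteq : t = m + 1 := by omega
          subst hteq
          have hlast := getD_append_last (kmpFailAux nl m).1
            (if nl.getD (m + 1) ' '
              == nl.getD (kmpWhile nl (kmpFailAux nl m).1 (nl.getD (m + 1) ' ')
                (kmpFailAux nl m).2 (kmpFailAux nl m).2) ' '
            then kmpWhile nl (kmpFailAux nl m).1 (nl.getD (m + 1) ' ')
                (kmpFailAux nl m).2 (kmpFailAux nl m).2 + 1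
            else kmpWhile nl (kmpFailAux nl m).1 (nl.getD (m + 1) ' ')
                (kmpFailAux nl m).2 (kmpFailAux nl m).2)
          rw [hL] at hlast
          rw [hlast]
          exact hstep'

-- ---------- the scan ----------

lemma kmpScan_spec (nl hl : List Char) (fail : List Nat) (hne : nl ≠ [])
    (hfail : ∀ t, t < nl.length - 1 → fail.getD t 0 = piF nl t) :
    ∀ rest i j, rest = hl.drop i → i ≤ hl.length →
      j = mpF nl (hl.take i) nl.length → j < nl.length →
      (∀ s, s + nl.length ≤ i → ¬ (nl <+: hl.drop s)) →
      kmpScan nl fail rest i j = sfwSpec nl hl := by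
  have hnl0 : 0 < nl.length := List.length_pos_iff.mpr hne
  intro rest
  induction rest with
  | nil =>
      intro i j hrest hi hj hjlt hnof
      have hieq : i = hl.length := by
        have := List.drop_eq_nil_iff.mp hrest.symm
        omega
      subst hieq
      have hfind : PySem.Chars.find hl nl = -1 := by
        rw [PySem.Chars.find_eq_neg_one_iff]
        intro hinf
        obtain ⟨s, hs⟩ := (PySem.Chars.exists_prefix_drop_iff_isIn nl hl).mpr
          ((PySem.Chars.isIn_iff_infix nl hl).mpr hinf)
        have hls := hs.length_le
        rw [List.length_drop] at hls
        exact hnof s (by omega) hs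
      rw [List.take_length] at hj
      simp only [kmpScan]
      unfold sfwSpec
      rw [if_neg hne,
        if_neg (show ¬(PySem.Chars.find hl nl ≠ -1) from by simp [hfind])]
      subst hj
      rfl
  | cons c cs ih =>
      intro i j hrest hi hj hjlt hnof
      have hi' : i < hl.length := by
        by_contra h
        rw [List.drop_eq_nil_iff.mpr (by omega)] at hrest
        exact (List.cons_ne_nil c cs) hrest
      have hrest' := hrest
      rw [List.drop_eq_getElem_cons hi'] at hrest'
      injection hrest' with hc1 hc2
      have hgetD : hl.getD i ' ' = c := by
        simp [List.getD, List.getElem?_eq_getElem hi', hc1]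
      have hstep := kmp_step nl fail (hl.take i) c (nl.length - 1)
        (by omega) (by intro t ht; exact hfail t ht) j (by omega)
        (by rw [hj]; exact mpF_suffix nl (hl.take i) nl.length)
        (by intro k' h1 h2 _; rw [hj]; exact le_mpF nl (hl.take i) nl.length k' (by omega) h2)
      have e : hl.take i ++ [c] = hl.take (i + 1) := by
        rw [take_succ_getD hl i hi', hgetD]
      rw [e, show nl.length - 1 + 1 = nl.length from by omega] at hstep
      simp only [kmpScan]
      by_cases hfull : (if c == nl.getD (kmpWhile nl fail c j j) ' '
          then kmpWhile nl fail c j j + 1 else kmpWhile nl fail c j j) = nl.length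
      · rw [if_pos hfull]
        rw [hfull] at hstep
        have hP : nl.take nl.length <:+ hl.take (i + 1) :=
          (Nat.findGreatest_eq_iff.mp hstep.symm).2.1 (by omega)
        rw [List.take_length] at hP
        have hocc := (suffix_take_iff_prefix_drop nl hl (i + 1) (by omega)).mp hP
        have hfge : 0 ≤ PySem.Chars.find hl nl := by
          rw [PySem.Chars.find_nonneg_iff]
          obtain ⟨t, ht⟩ := hocc.2
          exact ⟨hl.take (i + 1 - nl.length), t, by
            rw [List.append_assoc, ht, List.take_append_drop]⟩
        obtain ⟨hfp, hfmin⟩ := PySem.Chars.find_spec hfge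
        have htn : (PySem.Chars.find hl nl).toNat = i + 1 - nl.length := by
          have h1 : (PySem.Chars.find hl nl).toNat ≤ i + 1 - nl.length := by
            by_contra h
            exact hfmin (i + 1 - nl.length) (by omega) hocc.2
          have h2 : ¬ (PySem.Chars.find hl nl).toNat < i + 1 - nl.length := by
            intro h
            exact hnof (PySem.Chars.find hl nl).toNat (by omega) hfp
          omega
        have hfval : PySem.Chars.find hl nl = ((i + 1 - nl.length : Nat) : Int) := by
          have hcast := Int.toNat_of_nonneg hfge
          rw [htn] at hcast
          exact hcast.symm
        unfold sfwSpec
        rw [if_neg hne, if_pos (by rw [hfval]; intro hcontra; omega)]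
        rw [hfval, Nat.cast_sub hocc.1]
        push_cast
        ring
      · rw [if_neg hfull]
        apply ih (i + 1)
          (if c == nl.getD (kmpWhile nl fail c j j) ' '
            then kmpWhile nl fail c j j + 1 else kmpWhile nl fail c j j)
          hc2 (by omega) (by unfold mpF; exact hstep)
          (by
            have hle : (if c == nl.getD (kmpWhile nl fail c j j) ' '
                then kmpWhile nl fail c j j + 1 else kmpWhile nl fail c j j) ≤ nl.length := by
              rw [hstep]
              exact Nat.findGreatest_le nl.length
            omega)
        intro s hs
        by_cases hsi : s + nl.length ≤ i
        · exact hnof s hsi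
        · intro hp
          have hseq : s = i + 1 - nl.length := by omega
          have hsfx : nl <:+ hl.take (i + 1) :=
            (suffix_take_iff_prefix_drop nl hl (i + 1) (by omega)).mpr
              ⟨by omega, by rw [show i + 1 - nl.length = s from by omega]; exact hp⟩
          have hge : nl.length ≤ (if c == nl.getD (kmpWhile nl fail c j j) ' '
              then kmpWhile nl fail c j j + 1 else kmpWhile nl fail c j j) := by
            rw [hstep]
            exact Nat.le_findGreatest (le_refl _) (by rw [List.take_length]; exact hsfx)
          have hle : (if c == nl.getD (kmpWhile nl fail c j j) ' '
              then kmpWhile nl fail c j j + 1 else kmpWhile nl fail c j j) ≤ nl.length := by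
            rw [hstep]
            exact Nat.findGreatest_le nl.length
          exact hfull (by omega)

lemma alt_eq_sfwSpec (needle haystack : String) :
    string_find_with_overlap_alt needle haystack = sfwSpec needle.toList haystack.toList := by
  simp only [string_find_with_overlap_alt]
  by_cases h0 : needle.toList.length = 0
  · rw [if_pos h0]
    unfold sfwSpec
    rw [if_pos (List.length_eq_zero_iff.mp h0)]
  · rw [if_neg h0]
    have hne : needle.toList ≠ [] := fun h => h0 (by simp [h])
    apply kmpScan_spec _ _ _ hne
    · intro t ht
      exact (kmpFailAux_spec needle.toList (needle.toList.length - 1) (by omega)).2.2 t (by omega)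
    · exact List.drop_zero.symm
    · exact Nat.zero_le _
    · symm
      unfold mpF
      rw [Nat.findGreatest_eq_iff]
      refine ⟨Nat.zero_le _, fun h => absurd rfl h, fun n hn1 hn2 hP => ?_⟩
      rw [List.take_zero] at hP
      have := hP.length_le
      simp only [List.length_take, List.length_nil] at this
      omega
    · omega
    · intro s hs
      exact absurd hs (by omega)

-- ---------- A's phase 2 equals the descending-overlap helper ----------

lemma loopA_eq_descend (nl hl : List Char) (k : Nat)
    (hkh : k ≤ hl.length) (hkn : k ≤ nl.length) :
    sfwLoopA nl hl (hl.length : Int) ((hl.length : Int) - (k : Int)) (k : Int)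
      = ovDescend nl hl k := by
  induction k with
  | zero =>
      rw [sfwLoopA]
      simp [ovDescend]
  | succ k ih =>
      rw [sfwLoopA, dif_pos (by push_cast; omega)]
      rw [ovDescend]
      rw [PySem.List.slice_from hl (by push_cast; omega)]
      have hkk : ((k : Int) + 1) = (((k + 1 : Nat)) : Int) := by push_cast; ring
      rw [hkk, PySem.List.slice_to_natCast nl (k + 1)]
      have htn : (((hl.length : Int) - ((k + 1 : Nat) : Int)).toNat) = hl.length - (k + 1) := by
        omega
      rw [htn]
      have hlen_take : (nl.take (k + 1)).length = k + 1 := by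
        simp [List.length_take]; omega
      by_cases hc : nl.take (k + 1) = hl.drop (hl.length - (k + 1))
      · have hsuf : nl.take (k + 1) <:+ hl := by
          rw [List.suffix_iff_eq_drop, hlen_take]
          exact hc
        rw [if_pos hc, if_pos (by rw [PySem.Chars.endswith_iff]; exact hsuf)]
      · have hnsuf : ¬ (nl.take (k + 1) <:+ hl) := by
          rw [List.suffix_iff_eq_drop, hlen_take]
          exact hc
        rw [if_neg hc, if_neg (by rw [PySem.Chars.endswith_iff]; exact hnsuf)]
        have harg1 : (hl.length : Int) - ((k + 1 : Nat) : Int) + 1 = (hl.length : Int) - (k : Int) := by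
          push_cast; ring
        have harg2 : (((k + 1 : Nat)) : Int) - 1 = (k : Int) := by push_cast; ring
        rw [harg1, harg2]
        exact ih (by omega) (by omega)

-- Negative-h iterations of A's loop never match (length mismatch) and just advance h to 0.
lemma loopA_neg (nl hl : List Char) (m : Nat) (hm : hl.length + m < nl.length) :
    sfwLoopA nl hl (hl.length : Int) (-(m : Int)) ((hl.length : Int) + (m : Int))
      = sfwLoopA nl hl (hl.length : Int) 0 (hl.length : Int) := by
  induction m with
  | zero => norm_num
  | succ m ih =>
      rw [sfwLoopA, dif_pos (by constructor <;> push_cast <;> omega)]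
      rw [PySem.List.slice_some_none, PySem.List.slice_to nl (by push_cast; omega)]
      have hcl := PySem.List.clampIdx_le hl.length (-((m + 1 : Nat) : Int))
      rw [if_neg (by
        intro heq
        have hln := congrArg List.length heq
        simp only [List.length_take, List.length_drop] at hln
        omega)]
      have harg1 : -(((m + 1 : Nat)) : Int) + 1 = -(m : Int) := by push_cast; ring
      have harg2 : (hl.length : Int) + ((m + 1 : Nat) : Int) - 1 = (hl.length : Int) + (m : Int) := by
        push_cast; ring
      rw [harg1, harg2]
      exact ih (by omega)

-- Iterations of A's loop with overlap length above nlen never match (length mismatch).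
lemma loopA_long (nl hl : List Char) (d : Nat) (hd : nl.length + d ≤ hl.length) :
    sfwLoopA nl hl (hl.length : Int) ((hl.length : Int) - (nl.length : Int) - (d : Int))
        ((nl.length : Int) + (d : Int))
      = sfwLoopA nl hl (hl.length : Int) ((hl.length : Int) - (nl.length : Int)) (nl.length : Int) := by
  induction d with
  | zero => norm_num
  | succ d ih =>
      rw [sfwLoopA, dif_pos (by constructor <;> push_cast <;> omega)]
      rw [PySem.List.slice_from hl (by push_cast; omega), PySem.List.slice_to nl (by push_cast; omega)]
      rw [if_neg (by
        intro heq
        have hln := congrArg List.length heq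
        simp only [List.length_take, List.length_drop] at hln
        omega)]
      have harg1 : (hl.length : Int) - (nl.length : Int) - ((d + 1 : Nat) : Int) + 1
          = (hl.length : Int) - (nl.length : Int) - (d : Int) := by push_cast; ring
      have harg2 : (nl.length : Int) + ((d + 1 : Nat) : Int) - 1
          = (nl.length : Int) + (d : Int) := by push_cast; ring
      rw [harg1, harg2]
      exact ih (by omega)

-- ---------- the descending helper equals the findGreatest form ----------

lemma ovDescend_eq_mp (nl hl : List Char) :
    ∀ k, k ≤ nl.length → k ≤ hl.length →
      ovDescend nl hl k =
        (if 0 < Nat.findGreatest (fun m => nl.take m <:+ hl) k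
         then (hl.length : Int) - (Nat.findGreatest (fun m => nl.take m <:+ hl) k : Int)
         else -1) := by
  intro k
  induction k with
  | zero =>
      intro _ _
      simp [ovDescend]
  | succ k ih =>
      intro hn hh
      rw [ovDescend]
      have hkk : ((k : Int) + 1) = (((k + 1 : Nat)) : Int) := by push_cast; ring
      rw [hkk, PySem.List.slice_to_natCast nl (k + 1)]
      rw [Nat.findGreatest_succ]
      by_cases hE : nl.take (k + 1) <:+ hl
      · rw [if_pos (by rw [PySem.Chars.endswith_iff]; exact hE), if_pos hE,
          if_pos (by omega)]
      · rw [if_neg (by rw [PySem.Chars.endswith_iff]; exact hE), if_neg hE]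
        exact ih (by omega) (by omega)

lemma A_eq_sfwSpec (needle haystack : String) :
    string_find_with_overlap needle haystack = sfwSpec needle.toList haystack.toList := by
  unfold string_find_with_overlap sfwSpec
  simp only [ge_iff_le]
  by_cases hnl : needle.toList = []
  · simp [hnl, PySem.Chars.find_nil]
  · have hnl0 : 0 < needle.toList.length := List.length_pos_iff.mpr hnl
    rw [if_neg hnl]
    by_cases hord : needle.toList.length ≤ haystack.toList.length
    · rw [if_pos (by exact_mod_cast hord)]
      by_cases hi : PySem.Chars.find haystack.toList needle.toList = -1
      · rw [if_neg (by simp [hi]), if_neg (by simp [hi])]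
        have hmin0 : min ((haystack.toList.length : Int) - (needle.toList.length : Int) + 1) 0 = 0 := by
          omega
        rw [hmin0, sub_zero]
        have h3 := loopA_long needle.toList haystack.toList
          (haystack.toList.length - needle.toList.length) (by omega)
        rw [Nat.cast_sub hord] at h3
        ring_nf at h3 ⊢
        have h1 := loopA_eq_descend needle.toList haystack.toList needle.toList.length hord le_rfl
        ring_nf at h1
        rw [h3, h1]
        rw [ovDescend_eq_mp needle.toList haystack.toList needle.toList.length le_rfl hord]
        rfl
      · rw [if_pos (fun h => hi h.symm), if_pos hi]
    · rw [if_neg (by omega)]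
      have hi : PySem.Chars.find haystack.toList needle.toList = -1 := by
        rw [PySem.Chars.find_eq_neg_one_iff]
        intro hinf
        have := hinf.length_le
        omega
      rw [if_neg (by simp [hi])]
      have hmdef : min ((haystack.toList.length : Int) - (needle.toList.length : Int) + 1) 0
          = -((needle.toList.length - 1 - haystack.toList.length : Nat) : Int) := by
        omega
      rw [hmdef]
      have e2 : (haystack.toList.length : Int)
            - -((needle.toList.length - 1 - haystack.toList.length : Nat) : Int)
          = (haystack.toList.length : Int)
            + ((needle.toList.length - 1 - haystack.toList.length : Nat) : Int) := by ring
      rw [e2]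
      rw [loopA_neg needle.toList haystack.toList
        (needle.toList.length - 1 - haystack.toList.length) (by omega)]
      have h1 := loopA_eq_descend needle.toList haystack.toList haystack.toList.length le_rfl (by omega)
      simp only [sub_self] at h1
      rw [h1]
      rw [ovDescend_eq_mp needle.toList haystack.toList haystack.toList.length (by omega) le_rfl]
      have hbb := findGreatest_eq_of_bound (fun m => needle.toList.take m <:+ haystack.toList)
        needle.toList.length haystack.toList.length (by omega)
        (by
          intro m hm1 hm2 hP
          have := hP.length_le
          simp only [List.length_take] at this
          omega)
      unfold mpF
      rw [hbb]

-- ===== VERDICT (by name: the statement is the Claim_ definition above) =====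
theorem string_find_with_overlap_spec : Claim_equal_string_find_with_overlap := by
  intro needle haystack _
  unfold Spec_string_find_with_overlap
  rw [A_eq_sfwSpec, alt_eq_sfwSpec]
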